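-- pv_equiv track=rewrite | github.com/GREEDYS0NNY/AISD_Laboratorium | Laboratorium_9/DFS.py | DFS
-- ===== SOURCE A (Python) =====
-- def DFS(G):
--     V = len(G)
--     visited = [False] * V
--     parent = [-1] * V
--     time = 0
--
--     for u in range(V):
--         if not visited[u]:
--             time = DFS_Explore(G, u, visited, parent, time)
--     return time
--
-- def DFS_Explore(G, u, visited, parent, time):
--     time += 1
--     u_time_1 = time
--     visited[u] = True
--
--     for v in range(len(G[u])):
--         if G[u][v] == 1 and not visited[v]:
--             parent[v] = u
--             time = DFS_Explore(G, v, visited, parent, time)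
--
--     time += 1
--     u_time_2 = time
--     return time
-- ===== SOURCE B (Python) =====
-- def DFS(G):
--     # Every vertex is discovered and finished exactly once, and each event
--     # increments the timestamp, so the final time is 2 * |V|.
--     return 2 * len(G)
-- ===== Notes on version B (the rewrite author's own statement) =====
-- stated objective: faster
-- what changed: Replaces the full DFS traversal (recursive explore over the adjacency matrix) by the closed form 2*len(G): each vertex contributes exactly one discovery and one finish tick to the timestamp.
import Mathlib
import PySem

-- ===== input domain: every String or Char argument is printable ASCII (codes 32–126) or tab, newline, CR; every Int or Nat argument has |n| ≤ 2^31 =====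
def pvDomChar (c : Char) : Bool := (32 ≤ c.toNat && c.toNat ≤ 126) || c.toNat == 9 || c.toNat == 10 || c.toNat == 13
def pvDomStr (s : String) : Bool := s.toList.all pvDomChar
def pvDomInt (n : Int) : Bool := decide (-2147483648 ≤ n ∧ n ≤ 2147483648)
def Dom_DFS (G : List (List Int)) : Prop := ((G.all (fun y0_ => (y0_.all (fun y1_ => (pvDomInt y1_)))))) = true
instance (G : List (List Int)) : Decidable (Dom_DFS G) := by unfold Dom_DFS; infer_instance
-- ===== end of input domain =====

-- B replaces the DFS traversal by the closed form 2*len(G) (each vertex is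
-- discovered once and finished once, each event ticking the clock).

-- ===== PORT A =====
-- Port of DFS_Explore. Python recursion has no fuel; the fuel argument only
-- makes the recursion total in Lean and is always sufficient on inputs where
-- Python returns (the recursion depth is bounded by the number of unvisited
-- vertices). Out-of-range reads `visited[v]` / `G[u]` that raise in Python are
-- rendered with getD defaults; Pre_DFS excludes exactly the raising inputs.
def DFS_Explore (G : List (List Int)) :
    Nat → Nat → List Bool → List Int → Int → (List Bool × List Int × Int)
  | 0 => fun _ visited parent time => (visited, parent, time)
  | (fuel+1) => fun u visited parent time =>
      let time1 := time + 1
      let visited1 := visited.set u true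
      let row := G.getD u []
      let st := (List.range row.length).foldl
        (fun (st : List Bool × List Int × Int) v =>
          if row.getD v 0 = 1 ∧ st.1.getD v true = false then
            DFS_Explore G fuel v st.1 (st.2.1.set v (Int.ofNat u)) st.2.2
          else st)
        (visited1, parent, time1)
      (st.1, st.2.1, st.2.2 + 1)

def DFS (G : List (List Int)) : Int :=
  let V := G.length
  let st := (List.range V).foldl
    (fun (st : List Bool × List Int × Int) u =>
      if st.1.getD u true = false then
        DFS_Explore G V u st.1 st.2.1 st.2.2
      else st)
    (List.replicate V false, List.replicate V (-1), 0)
  st.2.2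

-- ===== PORT B =====
def DFS_alt (G : List (List Int)) : Int := 2 * (G.length : Int)

-- ===== PRECONDITION & SPEC =====
-- Pre_ excludes exactly the inputs on which the Python A raises IndexError:
-- graphs where some row carries the entry 1 at a column index ≥ len(G)
-- (then `visited[v]` is indexed out of range during the row scan).
def Pre_DFS (G : List (List Int)) : Prop :=
  ∀ row ∈ G, (1 : Int) ∉ row.drop G.length
instance (G : List (List Int)) : Decidable (Pre_DFS G) := by
  unfold Pre_DFS; infer_instance

def pvWitness_DFS : List (List Int) := [[0, 1], [1, 0]]

def Spec_DFS (G : List (List Int)) (out : Int) : Prop := out = DFS_alt G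
instance (G : List (List Int)) (out : Int) : Decidable (Spec_DFS G out) := by
  unfold Spec_DFS; infer_instance

-- ===== CLAIM (what is proved, stated in full; the proofs are below) =====
def Claim_equal_DFS : Prop :=
  ∀ (G : List (List Int)), Dom_DFS G → Pre_DFS G → Spec_DFS G (DFS G)

-- ===== LEMMAS AND PROOFS =====

lemma getD_false_lt (l : List Bool) (u : Nat) (h : l.getD u true = false) :
    u < l.length := by
  by_contra hge
  rw [List.getD_eq_getElem?_getD, List.getElem?_eq_none (by omega)] at h
  simp at h

lemma getD_set_true_self (l : List Bool) (u : Nat) :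
    (l.set u true).getD u true = true := by
  induction l generalizing u with
  | nil => simp [List.getD]
  | cons a t ih =>
    cases u with
    | zero => simp [List.getD]
    | succ n => simpa [List.getD] using ih n

lemma getD_set_true_mono (l : List Bool) (u i : Nat)
    (h : l.getD i true = true) : (l.set u true).getD i true = true := by
  induction l generalizing u i with
  | nil => simp [List.getD]
  | cons a t ih =>
    cases u with
    | zero =>
      cases i with
      | zero => simp [List.getD]
      | succ j => simpa [List.getD] using h
    | succ n =>
      cases i with
      | zero => simpa [List.getD] using h
      | succ j => simpa [List.getD] using ih n j (by simpa [List.getD] using h)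

lemma count_false_set_true (l : List Bool) (u : Nat)
    (h : l.getD u true = false) :
    (l.set u true).count false + 1 = l.count false := by
  induction l generalizing u with
  | nil => simp [List.getD] at h
  | cons a t ih =>
    cases u with
    | zero =>
      simp [List.getD] at h
      subst h
      simp
    | succ n =>
      have := ih n (by simpa [List.getD] using h)
      simp [List.count_cons]
      omega

lemma count_false_pos (l : List Bool) (u : Nat) (h : l.getD u true = false) :
    0 < l.count false := by
  have hu := getD_false_lt l u h
  rw [List.getD_eq_getElem?_getD, List.getElem?_eq_getElem hu] at h
  simp at h
  exact List.count_pos_iff.mpr (h ▸ List.getElem_mem hu)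

lemma count_false_zero (l : List Bool)
    (h : ∀ i < l.length, l.getD i true = true) : l.count false = 0 := by
  rw [List.count_eq_zero]
  intro hmem
  obtain ⟨i, hi, hval⟩ := List.mem_iff_getElem.mp hmem
  have := h i hi
  rw [List.getD_eq_getElem?_getD, List.getElem?_eq_getElem hi] at this
  simp [hval] at this

/-- Characterisation of `DFS_Explore`: with sufficient fuel and an unvisited
start vertex it returns the input time plus twice the number of newly visited
vertices, never unmarks a vertex, marks `u`, and preserves the length. -/
lemma explore_spec (G : List (List Int)) :
    ∀ (fuel : Nat) (u : Nat) (visited : List Bool) (parent : List Int) (time : Int),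
      visited.getD u true = false → visited.count false ≤ fuel →
      ∃ v' p',
        DFS_Explore G fuel u visited parent time
          = (v', p', time + 2 * ((visited.count false : Int) - (v'.count false : Int)))
        ∧ v'.length = visited.length
        ∧ (∀ i, visited.getD i true = true → v'.getD i true = true)
        ∧ v'.getD u true = true
        ∧ v'.count false ≤ visited.count false := by
  intro fuel
  induction fuel with
  | zero =>
    intro u visited parent time hu hcf
    exact absurd hcf (by have := count_false_pos visited u hu; omega)
  | succ fuel ih =>
    intro u visited parent time hu hcf
    -- inner loop over the row, by induction on the index list
    have inner : ∀ (vs : List Nat) (vis : List Bool) (par : List Int) (t : Int),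
        vis.count false ≤ fuel →
        ∃ v' p',
          (vs.foldl
            (fun (st : List Bool × List Int × Int) v =>
              if (G.getD u []).getD v 0 = 1 ∧ st.1.getD v true = false then
                DFS_Explore G fuel v st.1 (st.2.1.set v (Int.ofNat u)) st.2.2
              else st)
            (vis, par, t))
            = (v', p', t + 2 * ((vis.count false : Int) - (v'.count false : Int)))
          ∧ v'.length = vis.length
          ∧ (∀ i, vis.getD i true = true → v'.getD i true = true)
          ∧ v'.count false ≤ vis.count false := by
      intro vs
      induction vs with
      | nil =>
        intro vis par t _
        exact ⟨vis, par, by simp, rfl, fun _ h => h, le_refl _⟩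
      | cons v rest ihv =>
        intro vis par t hle
        by_cases hg : (G.getD u []).getD v 0 = 1 ∧ vis.getD v true = false
        · obtain ⟨v1, p1, heq1, hlen1, hmono1, _, hle1⟩ :=
            ih v vis (par.set v (Int.ofNat u)) t hg.2 hle
          obtain ⟨v2, p2, heq2, hlen2, hmono2, hle2⟩ :=
            ihv v1 p1 (t + 2 * ((vis.count false : Int) - (v1.count false : Int)))
              (le_trans hle1 hle)
          refine ⟨v2, p2, ?_, hlen2.trans hlen1,
            fun i h => hmono2 i (hmono1 i h), le_trans hle2 hle1⟩
          simp only [List.foldl_cons, if_pos hg, heq1]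
          rw [heq2]
          ring_nf
        · obtain ⟨v', p', heq, hlen, hmono, hle'⟩ := ihv vis par t hle
          refine ⟨v', p', ?_, hlen, hmono, hle'⟩
          simp only [List.foldl_cons, if_neg hg, heq]
    -- unfold one step of DFS_Explore
    have hu_lt := getD_false_lt visited u hu
    have hset := count_false_set_true visited u hu
    obtain ⟨v', p', heq, hlen, hmono, hle'⟩ :=
      inner (List.range (G.getD u []).length) (visited.set u true) parent (time + 1)
        (by omega)
    have hdef : DFS_Explore G (fuel+1) u visited parent time
        = (v', p', (time + 1
            + 2 * (((visited.set u true).count false : Int) - (v'.count false : Int))) + 1) := by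
      show ((fun st : List Bool × List Int × Int => (st.1, st.2.1, st.2.2 + 1))
        ((List.range (G.getD u []).length).foldl
          (fun (st : List Bool × List Int × Int) v =>
            if (G.getD u []).getD v 0 = 1 ∧ st.1.getD v true = false then
              DFS_Explore G fuel v st.1 (st.2.1.set v (Int.ofNat u)) st.2.2
            else st)
          (visited.set u true, parent, time + 1))) = _
      rw [heq]
    refine ⟨v', p', ?_, by simpa [List.length_set] using hlen,
      fun i h => hmono i (getD_set_true_mono visited u i h),
      hmono u (getD_set_true_self visited u), by omega⟩
    rw [hdef]
    simp only [Prod.mk.injEq]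
    exact ⟨trivial, trivial, by omega⟩

/-- The outer loop of `DFS`: folding the explore step over any index list adds
twice the number of newly visited vertices to the time, never unmarks a vertex,
and leaves every index of the list visited. -/
lemma outer_spec (G : List (List Int)) :
    ∀ (us : List Nat) (visited : List Bool) (parent : List Int) (time : Int),
      visited.count false ≤ G.length →
      ∃ v' p',
        (us.foldl
          (fun (st : List Bool × List Int × Int) u =>
            if st.1.getD u true = false then
              DFS_Explore G G.length u st.1 st.2.1 st.2.2
            else st)
          (visited, parent, time))
          = (v', p', time + 2 * ((visited.count false : Int) - (v'.count false : Int)))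
        ∧ v'.length = visited.length
        ∧ (∀ i, visited.getD i true = true → v'.getD i true = true)
        ∧ (∀ u ∈ us, v'.getD u true = true)
        ∧ v'.count false ≤ visited.count false := by
  intro us
  induction us with
  | nil =>
    intro visited parent time _
    exact ⟨visited, parent, by simp, rfl, fun _ h => h, by simp, le_refl _⟩
  | cons u rest ih =>
    intro visited parent time hle
    by_cases hu : visited.getD u true = false
    · obtain ⟨v1, p1, heq1, hlen1, hmono1, hu1, hle1⟩ :=
        explore_spec G G.length u visited parent time hu hle
      obtain ⟨v2, p2, heq2, hlen2, hmono2, hall2, hle2⟩ :=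
        ih v1 p1 (time + 2 * ((visited.count false : Int) - (v1.count false : Int)))
          (le_trans hle1 hle)
      refine ⟨v2, p2, ?_, hlen2.trans hlen1,
        fun i h => hmono2 i (hmono1 i h), fun w hw => ?_, le_trans hle2 hle1⟩
      · simp only [List.foldl_cons, if_pos hu, heq1]
        rw [heq2]; ring_nf
      · rcases List.mem_cons.mp hw with h | h
        · exact h ▸ hmono2 u hu1
        · exact hall2 w h
    · have hu' : visited.getD u true = true := by
        cases hx : visited.getD u true with
        | false => exact absurd hx hu
        | true => rfl
      obtain ⟨v', p', heq, hlen, hmono, hall, hle'⟩ := ih visited parent time hle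
      refine ⟨v', p', ?_, hlen, hmono, fun w hw => ?_, hle'⟩
      · simp only [List.foldl_cons, if_neg hu, heq]
      · rcases List.mem_cons.mp hw with h | h
        · exact h ▸ hmono u hu'
        · exact hall w h

-- ===== VERDICT (by name: the statement is the Claim_ definition above) =====
theorem DFS_spec : Claim_equal_DFS := by
  intro G _ _
  unfold Spec_DFS DFS DFS_alt
  obtain ⟨v', p', heq, hlen, _, hall, _⟩ :=
    outer_spec G (List.range G.length)
      (List.replicate G.length false) (List.replicate G.length (-1)) 0
      (by simp)
  simp only [heq]
  have hzero : v'.count false = 0 := by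
    apply count_false_zero
    intro i hi
    exact hall i (List.mem_range.mpr (by
      rw [hlen, List.length_replicate] at hi; exact hi))
  simp [hzero]
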